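-- pv_equiv track=rewrite | github.com/s-b-repo/combing | comb.py | generate_unique_case_combinations
-- ===== SOURCE A (Python) =====
-- from itertools import product
--
-- def generate_unique_case_combinations(text):
--     # Find positions of alphabetic characters
--     letter_positions = [i for i, char in enumerate(text) if char.isalpha()]
--
--     # Generate all unique combinations of cases
--     unique_combinations = set()
--     for bits in product([0, 1], repeat=len(letter_positions)):
--         new_text = list(text)
--         for i, bit in zip(letter_positions, bits):
--             new_text[i] = new_text[i].upper() if bit else new_text[i].lower()
--         unique_combinations.add("".join(new_text))  # Add to set to avoid duplicates
--
--     return list(unique_combinations)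
-- ===== SOURCE B (Python) =====
-- def generate_unique_case_combinations(text):
--     seen = set()
--
--     def go(i, built):
--         if i == len(text):
--             seen.add(built)
--             return
--         ch = text[i]
--         if ch.isalpha():
--             go(i + 1, built + ch.lower())
--             go(i + 1, built + ch.upper())
--         else:
--             go(i + 1, built + ch)
--
--     go(0, "")
--     return list(seen)
-- ===== Notes on version B (the rewrite author's own statement) =====
-- stated objective: alternative
-- what changed: Replaces itertools.product over bit tuples plus per-combination list(text) copying and index patching with a single recursion over the characters that branches lower/upper at each letter and adds each finished string to the shared set.
import Mathlib
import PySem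

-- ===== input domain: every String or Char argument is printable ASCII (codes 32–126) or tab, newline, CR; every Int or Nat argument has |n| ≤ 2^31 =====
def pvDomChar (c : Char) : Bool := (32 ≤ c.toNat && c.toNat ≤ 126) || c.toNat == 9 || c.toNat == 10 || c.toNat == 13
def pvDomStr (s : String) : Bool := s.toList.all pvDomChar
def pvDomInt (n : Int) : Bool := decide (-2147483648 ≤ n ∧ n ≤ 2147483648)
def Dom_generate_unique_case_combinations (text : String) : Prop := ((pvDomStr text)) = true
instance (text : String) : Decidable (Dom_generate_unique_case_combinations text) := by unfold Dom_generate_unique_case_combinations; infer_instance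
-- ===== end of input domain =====

-- B replaces A's product([0,1],…) plus index-patching with a branch-per-character recursion
-- accumulating finished strings into the shared set (objective: alternative decomposition).
-- The Python outputs are compared as sets; the Lean ports produce the set in insertion order.

-- ===== PORT A =====
-- itertools.product([0, 1], repeat=n), in Python's order (leftmost varies slowest)
def pvProduct01 : Nat → List (List Int)
  | 0 => [[]]
  | n + 1 => [0, 1].flatMap (fun b => (pvProduct01 n).map (fun bs => b :: bs))

def generate_unique_case_combinations (text : String) : List String :=
  let cs := text.toList
  -- letter_positions = [i for i, char in enumerate(text) if char.isalpha()]
  let letterPositions : List Int :=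
    (PySem.List.enumerate cs 0).filterMap
      (fun p => if PySem.Chars.isalpha p.2 then some p.1 else none)
  -- for bits in product([0,1], repeat=len(letter_positions)): … set.add("".join(new_text))
  (pvProduct01 letterPositions.length).foldl
    (fun (uc : PySem.Set String) bits =>
      let newText :=
        (letterPositions.zip bits).foldl
          (fun nt p =>
            let c := PySem.List.pyGetD nt p.1 ' '
            PySem.List.pySetD nt p.1
              (if p.2 ≠ 0 then PySem.Chars.upperChar c else PySem.Chars.lowerChar c))
          cs
      PySem.Set.add uc (String.ofList newText))
    PySem.Set.empty

-- ===== PORT B =====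
-- the recursive helper go(i, built): strings are carried as their char lists (exact on the domain)
def pvAltGo (cs : List Char) (built : List Char) (seen : PySem.Set String) : PySem.Set String :=
  match cs with
  | [] => PySem.Set.add seen (String.ofList built)
  | c :: rest =>
    if PySem.Chars.isalpha c then
      pvAltGo rest (built ++ [PySem.Chars.upperChar c])
        (pvAltGo rest (built ++ [PySem.Chars.lowerChar c]) seen)
    else
      pvAltGo rest (built ++ [c]) seen

def generate_unique_case_combinations_alt (text : String) : List String :=
  pvAltGo text.toList [] PySem.Set.empty

-- ===== PRECONDITION & SPEC =====
def Spec_generate_unique_case_combinations (text : String) (out : List String) : Prop := out = generate_unique_case_combinations_alt text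
instance (text : String) (out : List String) : Decidable (Spec_generate_unique_case_combinations text out) := by unfold Spec_generate_unique_case_combinations; infer_instance

-- ===== CLAIM (what is proved, stated in full; the proofs are below) =====
def Claim_equal_generate_unique_case_combinations : Prop := ∀ (text : String), Dom_generate_unique_case_combinations text → Spec_generate_unique_case_combinations text (generate_unique_case_combinations text)

-- ===== LEMMAS AND PROOFS =====

-- the common DFS tree of both programs: all case variants of cs, lower branch first
def pvGen : List Char → List (List Char)
  | [] => [[]]
  | c :: rest =>
    if PySem.Chars.isalpha c then
      (pvGen rest).map (PySem.Chars.lowerChar c :: ·) ++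
      (pvGen rest).map (PySem.Chars.upperChar c :: ·)
    else
      (pvGen rest).map (c :: ·)

def pvPos (cs : List Char) : List Int :=
  (PySem.List.enumerate cs 0).filterMap
    (fun p => if PySem.Chars.isalpha p.2 then some p.1 else none)

def pvStep (nt : List Char) (p : Int × Int) : List Char :=
  let c := PySem.List.pyGetD nt p.1 ' '
  PySem.List.pySetD nt p.1
    (if p.2 ≠ 0 then PySem.Chars.upperChar c else PySem.Chars.lowerChar c)

lemma pvEnumerate_shift {α : Type} (xs : List α) (s : Int) :
    PySem.List.enumerate xs (s + 1) =
      (PySem.List.enumerate xs s).map (fun p => (p.1 + 1, p.2)) := by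
  induction xs generalizing s with
  | nil => simp [PySem.List.enumerate_nil]
  | cons x xs ih =>
      rw [PySem.List.enumerate_cons, PySem.List.enumerate_cons, ih (s + 1), List.map_cons]

lemma pvPos_cons (c : Char) (rest : List Char) :
    pvPos (c :: rest) =
      (if PySem.Chars.isalpha c then [(0 : Int)] else []) ++
        (pvPos rest).map (· + 1) := by
  unfold pvPos
  rw [PySem.List.enumerate_cons, show (0 : Int) + 1 = 0 + 1 by rfl, pvEnumerate_shift rest 0]
  rw [List.filterMap_cons, List.filterMap_map, List.map_filterMap]
  have hfm : List.filterMap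
      ((fun p => if PySem.Chars.isalpha p.2 = true then some p.1 else none) ∘
        fun p => (p.1 + 1, p.2)) (PySem.List.enumerate rest 0) =
      List.filterMap
        (fun p => Option.map (· + 1)
          (if PySem.Chars.isalpha p.2 = true then some p.1 else none))
        (PySem.List.enumerate rest 0) := by
    apply List.filterMap_congr
    intro p _
    by_cases h : PySem.Chars.isalpha p.2 = true <;> simp [h, Function.comp]
  rw [hfm]
  split_ifs <;> rfl

lemma pvPos_nonneg (cs : List Char) : ∀ i ∈ pvPos cs, 0 ≤ i := by
  induction cs with
  | nil => simp [pvPos, PySem.List.enumerate_nil]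
  | cons c rest ih =>
      intro i hi
      rw [pvPos_cons] at hi
      rcases List.mem_append.mp hi with h | h
      · split_ifs at h <;> simp_all
      · obtain ⟨j, hj, rfl⟩ := List.mem_map.mp h
        have := ih j hj; omega

lemma pvFold_shift (l : List (Int × Int)) (h : ∀ p ∈ l, 0 ≤ p.1) (c : Char) (nt : List Char) :
    (l.map (fun p => (p.1 + 1, p.2))).foldl pvStep (c :: nt) = c :: l.foldl pvStep nt := by
  induction l generalizing nt with
  | nil => simp
  | cons p l ih =>
      have hp : 0 ≤ p.1 := h p (by simp)
      have hstep : pvStep (c :: nt) (p.1 + 1, p.2) = c :: pvStep nt p := by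
        unfold pvStep
        have h1 : PySem.List.pyGetD (c :: nt) (p.1 + 1) ' ' = PySem.List.pyGetD nt p.1 ' ' := by
          rw [PySem.List.pyGetD_of_nonneg _ _ (by omega), PySem.List.pyGetD_of_nonneg _ _ hp]
          have : (p.1 + 1).toNat = p.1.toNat + 1 := by omega
          simp [this]
        have h2 : ∀ v, PySem.List.pySetD (c :: nt) (p.1 + 1) v = c :: PySem.List.pySetD nt p.1 v := by
          intro v
          rw [PySem.List.pySetD_of_nonneg _ _ (by omega), PySem.List.pySetD_of_nonneg _ _ hp]
          have : (p.1 + 1).toNat = p.1.toNat + 1 := by omega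
          simp [this]
        simp [h1, h2]
      simp only [List.map_cons, List.foldl_cons, hstep]
      exact ih (fun q hq => h q (by simp [hq])) _

lemma pvfst_mem {l1 : List Int} {l2 : List Int} {p : Int × Int}
    (hp : p ∈ l1.zip l2) : p.1 ∈ l1 := by
  obtain ⟨a, b⟩ := p
  exact (List.of_mem_zip hp).1

lemma pvApply_eq_gen (cs : List Char) :
    (pvProduct01 (pvPos cs).length).map
        (fun bits => ((pvPos cs).zip bits).foldl pvStep cs) = pvGen cs := by
  induction cs with
  | nil => simp [pvPos, PySem.List.enumerate_nil, pvProduct01, pvGen]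
  | cons c rest ih =>
      by_cases hc : PySem.Chars.isalpha c = true
      · have hlen : (pvPos (c :: rest)).length = (pvPos rest).length + 1 := by
          rw [pvPos_cons]; simp [hc]
        rw [hlen]
        have hprod : pvProduct01 ((pvPos rest).length + 1) =
            (pvProduct01 (pvPos rest).length).map ((0 : Int) :: ·) ++
            (pvProduct01 (pvPos rest).length).map ((1 : Int) :: ·) := by
          simp [pvProduct01, List.flatMap_cons]
        have hbranch : ∀ (b : Int) (bs : List Int),
            ((pvPos (c :: rest)).zip (b :: bs)).foldl pvStep (c :: rest) =
              (if b ≠ 0 then PySem.Chars.upperChar c else PySem.Chars.lowerChar c) ::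
                ((pvPos rest).zip bs).foldl pvStep rest := by
          intro b bs
          rw [pvPos_cons]; simp only [hc, if_pos]
          have hzip : ((pvPos rest).map (· + 1)).zip bs =
              ((pvPos rest).zip bs).map (fun p => (p.1 + 1, p.2)) := by
            rw [List.zip_map_left]; rfl
          simp only [List.cons_append, List.nil_append, List.zip_cons_cons, List.foldl_cons, hzip]
          have hstep0 : pvStep (c :: rest) (0, b) =
              (if b ≠ 0 then PySem.Chars.upperChar c else PySem.Chars.lowerChar c) :: rest := by
            unfold pvStep
            simp only [PySem.List.pyGetD_zero_cons]
            rw [PySem.List.pySetD_of_nonneg _ _ (by omega)]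
            simp
          rw [hstep0]
          exact pvFold_shift _ (fun p hp => pvPos_nonneg rest p.1 (pvfst_mem hp)) _ _
        rw [hprod, List.map_append, List.map_map, List.map_map]
        simp only [Function.comp_def, hbranch]
        simp only [pvGen, hc, if_pos]
        congr 1
        · rw [← ih, List.map_map]; rfl
        · rw [← ih, List.map_map]
          apply List.map_congr_left; intro bs _; simp
      · have hc' : PySem.Chars.isalpha c = false := by simpa using hc
        have hlen : (pvPos (c :: rest)).length = (pvPos rest).length := by
          rw [pvPos_cons]; simp [hc']
        rw [hlen]
        have hbranch : ∀ (bs : List Int),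
            ((pvPos (c :: rest)).zip bs).foldl pvStep (c :: rest) =
              c :: ((pvPos rest).zip bs).foldl pvStep rest := by
          intro bs
          rw [pvPos_cons]; simp only [hc', if_neg, Bool.false_eq_true, not_false_iff,
            List.nil_append]
          have hzip : ((pvPos rest).map (· + 1)).zip bs =
              ((pvPos rest).zip bs).map (fun p => (p.1 + 1, p.2)) := by
            rw [List.zip_map_left]; rfl
          rw [hzip]
          exact pvFold_shift _ (fun p hp => pvPos_nonneg rest p.1 (pvfst_mem hp)) _ _
        simp only [pvGen, hc', Bool.false_eq_true, if_false]
        rw [← ih, List.map_map]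
        apply List.map_congr_left; intro bs _
        exact hbranch bs

lemma pvAltGo_eq_foldl (cs : List Char) :
    ∀ (built : List Char) (seen : PySem.Set String),
      pvAltGo cs built seen =
        ((pvGen cs).map (fun t => String.ofList (built ++ t))).foldl PySem.Set.add seen := by
  induction cs with
  | nil => intro built seen; simp [pvAltGo, pvGen]
  | cons c rest ih =>
      intro built seen
      by_cases hc : PySem.Chars.isalpha c = true
      · simp only [pvAltGo, hc, if_pos, pvGen]
        rw [ih, ih]
        rw [List.map_append, List.foldl_append, List.map_map, List.map_map]
        have h1 : ((fun t => String.ofList (built ++ t)) ∘ fun t => PySem.Chars.lowerChar c :: t)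
            = fun t => String.ofList (built ++ [PySem.Chars.lowerChar c] ++ t) := by
          funext t; simp
        have h2 : ((fun t => String.ofList (built ++ t)) ∘ fun t => PySem.Chars.upperChar c :: t)
            = fun t => String.ofList (built ++ [PySem.Chars.upperChar c] ++ t) := by
          funext t; simp
        rw [h1, h2]
      · have hc' : PySem.Chars.isalpha c = false := by simpa using hc
        simp only [pvAltGo, hc', Bool.false_eq_true, if_false, pvGen]
        rw [ih, List.map_map]
        have h1 : ((fun t => String.ofList (built ++ t)) ∘ fun t => c :: t)
            = fun t => String.ofList (built ++ [c] ++ t) := by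
          funext t; simp
        rw [h1]

lemma pvA_eq_foldl (cs : List Char) :
    (pvProduct01 (pvPos cs).length).foldl
        (fun (uc : PySem.Set String) bits =>
          uc.add (String.ofList (((pvPos cs).zip bits).foldl pvStep cs)))
        PySem.Set.empty =
      ((pvGen cs).map (fun t => String.ofList t)).foldl PySem.Set.add PySem.Set.empty := by
  rw [← pvApply_eq_gen cs, List.map_map, List.foldl_map]
  rfl

-- ===== VERDICT (by name: the statement is the Claim_ definition above) =====
theorem generate_unique_case_combinations_spec : Claim_equal_generate_unique_case_combinations := by
  intro text _
  unfold Spec_generate_unique_case_combinations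
  show generate_unique_case_combinations text = generate_unique_case_combinations_alt text
  unfold generate_unique_case_combinations generate_unique_case_combinations_alt
  rw [pvAltGo_eq_foldl]
  have := pvA_eq_foldl text.toList
  simp only [pvPos] at this
  rw [show (fun t => String.ofList ([] ++ t)) = (fun t => String.ofList t) by funext t; simp]
  exact this
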